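-- pv_equiv track=rewrite | github.com/chaseuebelhart/Projects | TetrisAgent/evolutionaryAgent/featureFunctions.py | bumpiness
-- ===== SOURCE A (Python) =====
-- def absolute(n):
--     if n<0:
--         return n * -1
--     else:
--         return n
--
-- def bumpiness(board):
--     cols_heights = []
--     bumpiness = 0
--     for col in range(0, len(board)):
--         height = 0
--         c_h = 0
--         for row in range(len(board[col])-1, -1, -1):
--             c_h += 1
--             if board[col][row]:
--                 height += c_h
--                 c_h = 0
--         cols_heights.append(height)
--         if col>1:
--             bumpiness += absolute(cols_heights[-1]-cols_heights[-2])
--     return bumpiness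
-- ===== SOURCE B (Python) =====
-- def _height(col):
--     for i, cell in enumerate(col):
--         if cell:
--             return len(col) - i
--     return 0
--
-- def bumpiness(board):
--     heights = [_height(col) for col in board]
--     return sum(abs(a - b) for a, b in zip(heights[2:], heights[1:]))
-- ===== Notes on version B (the rewrite author's own statement) =====
-- stated objective: simpler
-- what changed: Replaces the single index-driven loop that grows cols_heights and reads it back with negative indexing by two passes: a heights list built from each column's topmost truthy cell (len - index, with early return), then a zip of shifted slices summing absolute adjacent differences (still skipping the column-0/1 pair).
import Mathlib
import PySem

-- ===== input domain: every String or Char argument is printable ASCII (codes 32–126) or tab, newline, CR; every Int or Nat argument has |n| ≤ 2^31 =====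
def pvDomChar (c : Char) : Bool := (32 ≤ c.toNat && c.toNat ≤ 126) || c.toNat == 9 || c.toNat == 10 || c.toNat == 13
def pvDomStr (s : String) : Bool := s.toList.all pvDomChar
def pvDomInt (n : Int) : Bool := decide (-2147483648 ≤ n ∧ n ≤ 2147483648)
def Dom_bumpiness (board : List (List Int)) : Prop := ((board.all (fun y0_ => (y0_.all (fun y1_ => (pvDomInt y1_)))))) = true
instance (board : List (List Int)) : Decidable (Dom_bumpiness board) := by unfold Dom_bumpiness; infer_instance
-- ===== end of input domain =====

-- B replaces A's single index-driven loop (growing cols_heights and negative indexing) by two passes: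
-- a heights list (topmost truthy cell per column) and a zip of shifted slices summing |adjacent diffs|;
-- objective: simpler. Equivalence of return values is proved for all boards.

-- ===== PORT A =====
def absolute (n : Int) : Int := if n < 0 then n * -1 else n

def bumpiness (board : List (List Int)) : Int :=
  ((PySem.List.pyRange 0 (board.length : Int) 1).foldl
    (fun (st : List Int × Int) col =>
      let colL := (PySem.List.pyGet? board col).getD []
      let inner := (PySem.List.pyRange ((colL.length : Int) - 1) (-1) (-1)).foldl
        (fun (hc : Int × Int) row =>
          if ((PySem.List.pyGet? colL row).getD 0) ≠ 0 then (hc.1 + (hc.2 + 1), 0)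
          else (hc.1, hc.2 + 1))
        (0, 0)
      let cols := st.1 ++ [inner.1]
      (cols,
        if col > 1 then
          st.2 + absolute (((PySem.List.pyGet? cols (-1)).getD 0) - ((PySem.List.pyGet? cols (-2)).getD 0))
        else st.2))
    ([], 0)).2

-- ===== PORT B =====
-- _height(col): first truthy cell index i gives len(col) - i, else 0
def heightAux (n : Int) (i : Int) : List Int → Int
  | [] => 0
  | x :: xs => if x ≠ 0 then n - i else heightAux n (i + 1) xs

def colHeight (cl : List Int) : Int := heightAux (cl.length : Int) 0 cl

def bumpiness_alt (board : List (List Int)) : Int :=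
  let heights := board.map colHeight
  ((heights.drop 2).zip (heights.drop 1)).foldl (fun acc p => acc + |p.1 - p.2|) 0

-- ===== PRECONDITION & SPEC =====
def Spec_bumpiness (board : List (List Int)) (out : Int) : Prop := out = bumpiness_alt board
instance (board : List (List Int)) (out : Int) : Decidable (Spec_bumpiness board out) := by unfold Spec_bumpiness; infer_instance

-- ===== CLAIM (what is proved, stated in full; the proofs are below) =====
def Claim_equal_bumpiness : Prop := ∀ (board : List (List Int)), Dom_bumpiness board → Spec_bumpiness board (bumpiness board)

-- ===== LEMMAS AND PROOFS =====

theorem absolute_eq (n : Int) : absolute n = |n| := by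
  unfold absolute
  split_ifs with h
  · rw [abs_of_neg h]; ring
  · rw [abs_of_nonneg (not_lt.mp h)]

-- nat-index form of A's inner loop body
def gNat (cl : List Int) (i : Nat) (hc : Int × Int) : Int × Int :=
  if (cl[i]?.getD 0) ≠ 0 then (hc.1 + (hc.2 + 1), 0) else (hc.1, hc.2 + 1)

theorem heightAux_shift (xs : List Int) : ∀ (n i : Int), heightAux (n + 1) (i + 1) xs = heightAux n i xs := by
  induction xs with
  | nil => intro n i; rfl
  | cons x xs ih =>
      intro n i
      simp only [heightAux]
      split
      · ring
      · exact ih n (i + 1)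

theorem colHeight_cons (x : Int) (xs : List Int) :
    colHeight (x :: xs) = if x ≠ 0 then ((xs.length : Int) + 1) else colHeight xs := by
  unfold colHeight
  simp only [heightAux, List.length_cons]
  split
  · push_cast; ring
  · push_cast
    exact heightAux_shift xs (xs.length : Int) 0

theorem inner_char (cl : List Int) : ∀ (s : Int × Int),
    (List.range cl.length).foldr (gNat cl) s =
      if colHeight cl = 0 then (s.1, s.2 + (cl.length : Int))
      else (s.1 + s.2 + colHeight cl, (cl.length : Int) - colHeight cl) := by
  induction cl with
  | nil => intro s; simp [colHeight, heightAux]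
  | cons x xs ih =>
      intro s
      have hmap : (List.range (x :: xs).length).foldr (gNat (x :: xs)) s
          = gNat (x :: xs) 0 ((List.range xs.length).foldr (gNat xs) s) := by
        simp only [List.length_cons, List.range_succ_eq_map, List.foldr_cons, List.foldr_map]
        congr 1
      rw [hmap, ih s]
      by_cases hx : x = 0
      · have hg : ∀ p : Int × Int, gNat (x :: xs) 0 p = (p.1, p.2 + 1) := by
          intro p; simp [gNat, hx]
        rw [hg, colHeight_cons]
        by_cases h0 : colHeight xs = 0
        · simp [hx, h0, Prod.ext_iff]
          omega
        · simp [hx, h0, Prod.ext_iff]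
          omega
      · have hg : ∀ p : Int × Int, gNat (x :: xs) 0 p = (p.1 + (p.2 + 1), 0) := by
          intro p; simp [gNat, hx]
        rw [hg, colHeight_cons]
        have hne : ¬ ((xs.length : Int) + 1 = 0) := by
          have : (0 : Int) ≤ (xs.length : Int) := Int.natCast_nonneg _
          omega
        by_cases h0 : colHeight xs = 0
        · simp [hx, h0, hne, Prod.ext_iff]
          omega
        · simp [hx, h0, hne, Prod.ext_iff]
          omega

theorem innerA_eq (cl : List Int) :
    ((PySem.List.pyRange ((cl.length : Int) - 1) (-1) (-1)).foldl
        (fun (hc : Int × Int) row =>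
          if ((PySem.List.pyGet? cl row).getD 0) ≠ 0 then (hc.1 + (hc.2 + 1), 0)
          else (hc.1, hc.2 + 1))
        (0, 0)).1 = colHeight cl := by
  have h1 : PySem.List.pyRange ((cl.length : Int) - 1) (-1) (-1)
      = (PySem.List.pyRange 0 (cl.length : Int) 1).reverse := by
    rw [PySem.List.pyRange_neg_one_eq_reverse]
    norm_num
  rw [h1, List.foldl_reverse, PySem.List.pyRange_one]
  simp only [sub_zero, Int.toNat_natCast, List.foldr_map, zero_add, PySem.List.pyGet?_natCast]
  have : (List.range cl.length).foldr
      (fun row (hc : Int × Int) =>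
        if (cl[row]?.getD 0) ≠ 0 then (hc.1 + (hc.2 + 1), 0) else (hc.1, hc.2 + 1)) (0, 0)
      = (List.range cl.length).foldr (gNat cl) ((0 : Int), (0 : Int)) := rfl
  rw [this, inner_char cl ((0 : Int), (0 : Int))]
  by_cases h0 : colHeight cl = 0
  · simp [h0]
  · simp [h0]

-- nat-index form of A's outer loop body, with the inner loop replaced by its value
def stepA (board : List (List Int)) (st : List Int × Int) (k : Nat) : List Int × Int :=
  let cols := st.1 ++ [colHeight (board[k]?.getD [])]
  (cols,
    if 1 < k then
      st.2 + |((PySem.List.pyGet? cols (-1)).getD 0) - ((PySem.List.pyGet? cols (-2)).getD 0)|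
    else st.2)

theorem bumpiness_eq_fold (board : List (List Int)) :
    bumpiness board = ((List.range board.length).foldl (stepA board) ([], 0)).2 := by
  unfold bumpiness
  rw [PySem.List.pyRange_one, List.foldl_map]
  simp only [sub_zero, Int.toNat_natCast]
  apply congrArg
  apply List.foldl_ext
  intro k _ st
  simp only [zero_add, PySem.List.pyGet?_natCast, stepA, absolute_eq, innerA_eq,
    Nat.one_lt_cast, gt_iff_lt]

-- summed |differences| added while processing columns `t` after prefix `pre`
def pairSum : List Int → List Int → Int
  | _, [] => 0
  | pre, h :: t =>
      (if 1 < pre.length then |h - pre.getLast?.getD 0| else 0) + pairSum (pre ++ [h]) t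

theorem A_fold (rest : List (List Int)) : ∀ (pre : List (List Int)) (acc : Int),
    (List.range' pre.length rest.length).foldl (stepA (pre ++ rest)) (pre.map colHeight, acc) =
      ((pre ++ rest).map colHeight, acc + pairSum (pre.map colHeight) (rest.map colHeight)) := by
  induction rest with
  | nil => intro pre acc; simp [pairSum]
  | cons r rest ih =>
      intro pre acc
      rw [List.length_cons, List.range'_succ, List.foldl_cons]
      have hget : ((pre ++ r :: rest)[pre.length]?.getD []) = r := by
        simp
      have hstep : stepA (pre ++ r :: rest) (pre.map colHeight, acc) pre.length
          = ((pre ++ [r]).map colHeight,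
             acc + (if 1 < pre.length then |colHeight r - (pre.map colHeight).getLast?.getD 0| else 0)) := by
        simp only [stepA, hget, List.map_append, List.map_cons, List.map_nil, Prod.mk.injEq]
        refine ⟨by simp, ?_⟩
        split_ifs with h
        · have h2 : 2 ≤ (pre.map colHeight).length := by simp; omega
          rw [PySem.List.pyGet?_neg_one_append_singleton,
            PySem.List.pyGet?_neg_ofNat (pre.map colHeight ++ [colHeight r]) 2 (by omega) (by simp; omega)]
          have hl : (pre.map colHeight ++ [colHeight r]).length - 2 = (pre.map colHeight).length - 1 := by
            simp
          rw [hl]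
          have hidx : (pre.map colHeight ++ [colHeight r])[(pre.map colHeight).length - 1]?
              = (pre.map colHeight)[(pre.map colHeight).length - 1]? := by
            rw [List.getElem?_append_left (by omega)]
          rw [hidx, ← List.getLast?_eq_getElem?]
          simp
        · simp
      rw [hstep]
      have hlen : pre.length + 1 = (pre ++ [r]).length := by simp
      have hassoc : (pre ++ [r]) ++ rest = pre ++ r :: rest := by simp
      rw [hlen]
      have := ih (pre ++ [r])
        (acc + (if 1 < pre.length then |colHeight r - (pre.map colHeight).getLast?.getD 0| else 0))
      rw [hassoc] at this
      rw [this]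
      simp only [List.map_cons, pairSum, List.map_append, List.map_nil, List.length_map,
        Prod.mk.injEq]
      refine ⟨by simp, by ring⟩

-- |differences| of consecutive elements of b :: t
def sumAdjFrom : Int → List Int → Int
  | _, [] => 0
  | b, h :: t => |h - b| + sumAdjFrom h t

theorem pairSum_snoc (t : List Int) : ∀ (pre : List Int) (b : Int), pre ≠ [] →
    pairSum (pre ++ [b]) t = sumAdjFrom b t := by
  induction t with
  | nil => intro pre b _; rfl
  | cons h t ih =>
      intro pre b hpre
      have hlen : 1 < (pre ++ [b]).length := by
        have : 0 < pre.length := List.length_pos_iff.mpr hpre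
        simp; omega
      simp only [pairSum, sumAdjFrom, if_pos hlen]
      congr 1
      · congr 1
        simp
      · exact ih (pre ++ [b]) h (by simp)

theorem B_zip (t : List Int) : ∀ (b acc : Int),
    (t.zip (b :: t)).foldl (fun acc p => acc + |p.1 - p.2|) acc = acc + sumAdjFrom b t := by
  induction t with
  | nil => intro b acc; simp [sumAdjFrom]
  | cons h t ih =>
      intro b acc
      simp only [List.zip_cons_cons, List.foldl_cons, sumAdjFrom]
      rw [ih h (acc + |h - b|)]
      ring

-- ===== VERDICT (by name: the statement is the Claim_ definition above) =====
theorem bumpiness_spec : Claim_equal_bumpiness := by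
  intro board _
  unfold Spec_bumpiness bumpiness_alt
  rw [bumpiness_eq_fold]
  have hA := A_fold board [] 0
  simp only [List.map_nil, List.nil_append, List.length_nil, zero_add] at hA
  rw [List.range_eq_range', hA]
  match hb : board.map colHeight with
  | [] => simp [pairSum]
  | [a] => simp [pairSum]
  | a :: b :: t =>
      simp only [List.drop_succ_cons, List.drop_zero]
      rw [B_zip t b 0]
      simp only [pairSum, List.nil_append, List.length_nil, List.length_cons]
      norm_num
      exact pairSum_snoc t [a] b (by simp)
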